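-- pv_equiv track=rewrite | github.com/aknsubbu/NRSCStudentApplicationPipeline | servers/ai/server_with_tesseract.py | _check_name_consistency
-- ===== SOURCE A (Python) =====
-- from typing import Dict, List, Optional, Tuple
--
-- def _check_name_consistency(names: List[str]) -> bool:
--     """Check if student names are consistent across documents"""
--     valid_names = [name for name in names if name and len(name) > 2]
--
--     if len(valid_names) < 2:
--         return True  # Cannot check consistency with insufficient data
--
--     # Extract first and last names for comparison
--     def extract_key_parts(full_name):
--         parts = full_name.lower().split()
--         return set(part for part in parts if len(part) > 2)
--
--     name_sets = [extract_key_parts(name) for name in valid_names]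
--
--     # Check if there's significant overlap between names
--     if len(name_sets) >= 2:
--         intersection = name_sets[0]
--         for name_set in name_sets[1:]:
--             intersection = intersection.intersection(name_set)
--
--         # If at least one significant name part matches
--         return len(intersection) > 0
--
--     return True
-- ===== SOURCE B (Python) =====
-- from typing import Dict, List, Optional, Tuple
--
-- def _check_name_consistency(names: List[str]) -> bool:
--     """Check if student names are consistent across documents"""
--     valid_names = [name for name in names if name and len(name) > 2]
--     if len(valid_names) < 2:
--         return True
--     part_sets = [{p for p in name.lower().split() if len(p) > 2}
--                  for name in valid_names]
--     counts = {}
--     for s in part_sets: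
--         for p in s:
--             counts[p] = counts.get(p, 0) + 1
--     # a part is common to all names iff it was counted once per name
--     return any(c == len(part_sets) for c in counts.values())
-- ===== Notes on version B (the rewrite author's own statement) =====
-- stated objective: alternative
-- what changed: Replaces the fold of pairwise set intersections with a frequency table: each name's distinct significant parts increment a counter once, and consistency holds iff some part's count equals the number of names.
import Mathlib
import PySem

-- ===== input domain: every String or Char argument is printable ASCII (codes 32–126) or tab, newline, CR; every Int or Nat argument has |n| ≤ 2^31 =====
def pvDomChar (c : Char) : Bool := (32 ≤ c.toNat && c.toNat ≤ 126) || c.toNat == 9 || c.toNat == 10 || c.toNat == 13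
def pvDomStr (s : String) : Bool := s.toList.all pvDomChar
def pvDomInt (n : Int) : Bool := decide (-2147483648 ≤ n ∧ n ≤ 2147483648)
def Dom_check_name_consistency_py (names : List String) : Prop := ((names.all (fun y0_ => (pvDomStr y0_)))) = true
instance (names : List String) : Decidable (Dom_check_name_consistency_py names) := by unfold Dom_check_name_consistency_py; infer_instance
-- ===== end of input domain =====

-- B replaces the fold of pairwise set intersections with one frequency table over all
-- names' distinct significant parts, checking whether some count reaches the number of names.

-- ===== PORT A =====
-- Python's nested helper extract_key_parts: set(part for part in full_name.lower().split() if len(part) > 2)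
def pvExtractKeyParts (full_name : String) : PySem.Set String :=
  PySem.Set.ofList ((PySem.Str.split₀ (PySem.Str.lower full_name)).filter
    (fun part => decide (2 < PySem.Str.len part)))

def check_name_consistency_py (names : List String) : Bool :=
  let valid_names := names.filter (fun name => !(name == "") && decide (2 < PySem.Str.len name))
  if valid_names.length < 2 then
    true
  else
    let name_sets := valid_names.map pvExtractKeyParts
    if 2 ≤ name_sets.length then
      match name_sets with
      | [] => true  -- unreachable: name_sets.length ≥ 2
      | s0 :: rest =>
        decide (0 < PySem.Set.len (rest.foldl (fun acc name_set => PySem.Set.inter acc name_set) s0))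
    else
      true

-- ===== PORT B =====
-- B's comprehension: {p for p in name.lower().split() if len(p) > 2}
def pvPartsOf (name : String) : PySem.Set String :=
  PySem.Set.ofList ((PySem.Str.split₀ (PySem.Str.lower name)).filter
    (fun p => decide (2 < PySem.Str.len p)))

def check_name_consistency_py_alt (names : List String) : Bool :=
  let valid_names := names.filter (fun name => !(name == "") && decide (2 < PySem.Str.len name))
  if valid_names.length < 2 then
    true
  else
    let part_sets := valid_names.map pvPartsOf
    let counts := part_sets.foldl
      (fun d s => s.foldl (fun d p => d.modify p (0 : Int) (· + 1)) d)
      (PySem.Dict.empty : PySem.Dict String Int)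
    counts.values.any (fun c => c == (part_sets.length : Int))

-- ===== PRECONDITION & SPEC =====
def Spec_check_name_consistency_py (names : List String) (out : Bool) : Prop := out = check_name_consistency_py_alt names
instance (names : List String) (out : Bool) : Decidable (Spec_check_name_consistency_py names out) := by unfold Spec_check_name_consistency_py; infer_instance

-- ===== CLAIM (what is proved, stated in full; the proofs are below) =====
def Claim_equal_check_name_consistency_py : Prop := ∀ (names : List String), Dom_check_name_consistency_py names → Spec_check_name_consistency_py names (check_name_consistency_py names)

-- ===== LEMMAS AND PROOFS =====

-- membership in A's fold of intersections
theorem pv_mem_foldl_inter (rest : List (PySem.Set String)) (acc : PySem.Set String) (x : String) :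
    x ∈ rest.foldl (fun a s => PySem.Set.inter a s) acc ↔ x ∈ acc ∧ ∀ s ∈ rest, x ∈ s := by
  induction rest generalizing acc with
  | nil => simp
  | cons s t ih =>
    simp only [List.foldl_cons, ih, PySem.Set.mem_inter, List.mem_cons]
    constructor
    · rintro ⟨⟨hx, hs⟩, hall⟩
      exact ⟨hx, fun u hu => hu.elim (fun h => h ▸ hs) (hall u)⟩
    · rintro ⟨hx, hall⟩
      exact ⟨⟨hx, hall s (Or.inl rfl)⟩, fun u hu => hall u (Or.inr hu)⟩

-- sum of per-set counts is at most the number of sets (each set Nodup)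
theorem pv_sum_counts_le (sets : List (List String)) (k : String)
    (hnd : ∀ s ∈ sets, s.Nodup) :
    (sets.map (List.count k)).sum ≤ sets.length := by
  induction sets with
  | nil => simp
  | cons s t ih =>
    have h1 : List.count k s ≤ 1 := List.nodup_iff_count_le_one.mp (hnd s (by simp)) k
    have h2 := ih (fun u hu => hnd u (by simp [hu]))
    simp only [List.map_cons, List.sum_cons, List.length_cons]
    omega

-- the flattened count reaches the number of sets iff the part lies in every set
theorem pv_count_flatten_eq_length (sets : List (List String)) (k : String)
    (hnd : ∀ s ∈ sets, s.Nodup) :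
    (sets.flatten.count k = sets.length) ↔ ∀ s ∈ sets, k ∈ s := by
  induction sets with
  | nil => simp
  | cons s t ih =>
    have h1 : List.count k s ≤ 1 := List.nodup_iff_count_le_one.mp (hnd s (by simp)) k
    have h2 := pv_sum_counts_le t k (fun u hu => hnd u (by simp [hu]))
    have ih' := ih (fun u hu => hnd u (by simp [hu]))
    rw [List.count_flatten] at ih' ⊢
    simp only [List.map_cons, List.sum_cons, List.length_cons, List.mem_cons]
    constructor
    · intro h
      have hs : List.count k s = 1 := by omega
      have ht : (t.map (List.count k)).sum = t.length := by omega
      exact fun u hu => hu.elim (fun e => e ▸ (List.count_pos_iff.mp (by omega)))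
        (fun hu => ih'.mp ht u hu)
    · intro h
      have hs : List.count k s = 1 := by
        have := List.count_pos_iff.mpr (h s (Or.inl rfl))
        omega
      have ht : (t.map (List.count k)).sum = t.length :=
        ih'.mpr (fun u hu => h u (Or.inr hu))
      omega

-- ===== MAIN PROOF =====
theorem pv_main (names : List String) :
    check_name_consistency_py names = check_name_consistency_py_alt names := by
  unfold check_name_consistency_py check_name_consistency_py_alt
  have hext : pvPartsOf = pvExtractKeyParts := rfl
  simp only [hext]
  set valid := names.filter (fun name => !(name == "") && decide (2 < PySem.Str.len name)) with hv
  by_cases hlt : valid.length < 2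
  · simp [hlt]
  · simp only [if_neg hlt]
    set sets := valid.map pvExtractKeyParts with hsets
    have hlen : 2 ≤ sets.length := by
      simp only [hsets, List.length_map]; omega
    rw [if_pos hlen]
    obtain ⟨s0, rest, hcons⟩ : ∃ s0 rest, sets = s0 :: rest := by
      have hne : sets ≠ [] := by
        intro h; rw [h] at hlen; simp at hlen
      exact List.exists_cons_of_ne_nil hne
    -- each set is Nodup (built by Set.ofList)
    have hnd : ∀ s ∈ sets, s.Nodup := by
      intro s hs
      simp only [hsets, List.mem_map] at hs
      obtain ⟨nm, _, rfl⟩ := hs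
      exact PySem.Set.nodup_ofList _
    -- rewrite B's dict loop into Counter of the flattened parts
    have hdict : sets.foldl (fun d s => s.foldl (fun d p => d.modify p (0 : Int) (· + 1)) d)
        (PySem.Dict.empty : PySem.Dict String Int) = PySem.Dict.counter sets.flatten := by
      rw [PySem.Dict.counter_eq_foldl, List.foldl_flatten]
    rw [hdict,
      PySem.Dict.values_eq_map_keys _ (PySem.Dict.nodup_keys_counter _) 0,
      PySem.Dict.keys_counter]
    -- B's side as an existential
    have hB : ((PySem.Set.ofList sets.flatten).map
          (fun k => (PySem.Dict.counter sets.flatten).getD k 0)).any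
          (fun c => c == (sets.length : Int)) = true ↔
        ∃ k ∈ sets.flatten, sets.flatten.count k = sets.length := by
      simp only [List.any_map, List.any_eq_true, Function.comp,
        PySem.Dict.getD_counter, beq_iff_eq, PySem.Set.mem_ofList]
      constructor
      · rintro ⟨k, hk, he⟩; exact ⟨k, hk, by exact_mod_cast he⟩
      · rintro ⟨k, hk, he⟩; exact ⟨k, hk, by exact_mod_cast he⟩
    -- A's side as an existential
    have hA : (0 < PySem.Set.len (rest.foldl (fun acc s => PySem.Set.inter acc s) s0)) ↔
        ∃ k, k ∈ s0 ∧ ∀ s ∈ rest, k ∈ s := by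
      simp only [PySem.Set.len]
      constructor
      · intro h
        have : 0 < (rest.foldl (fun acc s => PySem.Set.inter acc s) s0).length := by
          exact_mod_cast h
        obtain ⟨k, hk⟩ := List.length_pos_iff_exists_mem.mp this
        exact ⟨k, (pv_mem_foldl_inter rest s0 k).mp hk⟩
      · rintro ⟨k, hk⟩
        have : k ∈ rest.foldl (fun a s => PySem.Set.inter a s) s0 :=
          (pv_mem_foldl_inter rest s0 k).mpr hk
        have := List.length_pos_iff_exists_mem.mpr ⟨k, this⟩
        exact_mod_cast this
    -- the two existentials agree
    have hiff : (∃ k, k ∈ s0 ∧ ∀ s ∈ rest, k ∈ s) ↔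
        ∃ k ∈ sets.flatten, sets.flatten.count k = sets.length := by
      constructor
      · rintro ⟨k, hk0, hkr⟩
        have hall : ∀ s ∈ sets, k ∈ s := by
          intro s hs; rw [hcons] at hs
          rcases List.mem_cons.mp hs with h | h
          · exact h ▸ hk0
          · exact hkr s h
        refine ⟨k, ?_, (pv_count_flatten_eq_length sets k hnd).mpr hall⟩
        exact List.mem_flatten.mpr ⟨s0, by rw [hcons]; simp, hk0⟩
      · rintro ⟨k, _, hcnt⟩
        have hall := (pv_count_flatten_eq_length sets k hnd).mp hcnt
        exact ⟨k, hall s0 (by rw [hcons]; simp),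
          fun s hs => hall s (by rw [hcons]; simp [hs])⟩
    rw [hcons]
    simp only [← hcons]
    rw [Bool.eq_iff_iff, decide_eq_true_iff, hA, hiff, ← hB]

-- ===== VERDICT (by name: the statement is the Claim_ definition above) =====
theorem check_name_consistency_py_spec : Claim_equal_check_name_consistency_py := by
  intro names _
  unfold Spec_check_name_consistency_py
  exact pv_main names
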